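-- pv_equiv track=rewrite | github.com/kulwinderkour/Smart-Placement-Tracker | ai-engine/app/agents/brain_agent.py | _deterministic_memory_answer
-- ===== SOURCE A (Python) =====
-- def _deterministic_memory_answer(
--     instruction: str,
--     applications: list[dict],
--     traces: list[dict],
-- ) -> str:
--     if not applications:
--         return "I don't have any application history stored yet. Try running an apply pipeline first!"
--     applied  = [a for a in applications if a.get("status") == "applied"]
--     failed   = [a for a in applications if a.get("status") == "failed"]
--     skipped  = [a for a in applications if a.get("status") in ("skipped", "duplicate")]
--     parts = [f"Application summary: {len(applied)} applied, {len(failed)} failed, {len(skipped)} skipped."]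
--     if applied:
--         names = ", ".join(
--             (a.get("job_title") or f"job#{a.get('job_id','?')}") + " @ " + (a.get("company") or "?")
--             for a in applied[:5]
--         )
--         parts.append(f"Applied to: {names}.")
--     if failed:
--         f_names = ", ".join(
--             (a.get("job_title") or f"job#{a.get('job_id','?')}") +
--             (f" (reason: {a['reason']})" if a.get("reason") else "")
--             for a in failed[:5]
--         )
--         parts.append(f"Failed: {f_names}.")
--     return " ".join(parts)
-- ===== SOURCE B (Python) =====
-- def _deterministic_memory_answer(
--     instruction: str,
--     applications: list[dict],
--     traces: list[dict],
-- ) -> str: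
--     if not applications:
--         return "I don't have any application history stored yet. Try running an apply pipeline first!"
--     na = nf = ns = 0
--     ap5 = []  # formatted names of the first five applied entries
--     fl5 = []  # formatted names of the first five failed entries
--     for a in applications:
--         st = a.get("status")
--         if st == "applied":
--             na += 1
--             if len(ap5) < 5:
--                 ap5.append((a.get("job_title") or f"job#{a.get('job_id','?')}")
--                            + " @ " + (a.get("company") or "?"))
--         elif st == "failed":
--             nf += 1
--             if len(fl5) < 5:
--                 r = a.get("reason")
--                 fl5.append((a.get("job_title") or f"job#{a.get('job_id','?')}")
--                            + (f" (reason: {r})" if r else ""))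
--         elif st in ("skipped", "duplicate"):
--             ns += 1
--     out = f"Application summary: {na} applied, {nf} failed, {ns} skipped."
--     if na:
--         out += " Applied to: " + ", ".join(ap5) + "."
--     if nf:
--         out += " Failed: " + ", ".join(fl5) + "."
--     return out
-- ===== Notes on version B (the rewrite author's own statement) =====
-- stated objective: alternative
-- what changed: Replaces A's three filtering passes (and later slicing/formatting of the full filtered lists) by a single classifying pass that maintains only three counters and the already-formatted first five applied/failed names, then concatenates the summary from that state.
import Mathlib
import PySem

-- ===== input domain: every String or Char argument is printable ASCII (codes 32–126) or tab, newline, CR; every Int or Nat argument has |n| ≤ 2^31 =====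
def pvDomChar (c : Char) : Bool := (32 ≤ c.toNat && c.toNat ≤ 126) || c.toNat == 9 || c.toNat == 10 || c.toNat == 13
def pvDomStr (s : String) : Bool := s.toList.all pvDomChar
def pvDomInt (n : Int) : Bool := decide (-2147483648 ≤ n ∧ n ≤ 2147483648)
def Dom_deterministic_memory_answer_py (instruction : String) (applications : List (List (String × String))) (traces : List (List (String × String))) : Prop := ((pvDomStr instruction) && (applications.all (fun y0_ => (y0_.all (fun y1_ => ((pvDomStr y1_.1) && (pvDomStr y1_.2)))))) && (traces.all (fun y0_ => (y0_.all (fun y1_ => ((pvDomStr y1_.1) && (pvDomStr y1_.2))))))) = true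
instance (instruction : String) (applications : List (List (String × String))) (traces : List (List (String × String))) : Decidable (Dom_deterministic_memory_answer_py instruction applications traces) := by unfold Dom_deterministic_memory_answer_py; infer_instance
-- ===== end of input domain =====

-- B replaces A's three filtering passes by one classifying pass that keeps only counts and the
-- (already formatted) first five applied/failed names; objective: alternative single-pass decomposition.

-- shared formatting helpers: both Pythons contain these identical expressions
-- `x or y` on an optional string (Python falsy = missing or "")
def pvOr (o : Option String) (d : String) : String :=
  match o with
  | some s => if s = "" then d else s
  | none => d

-- (a.get("job_title") or f"job#{a.get('job_id','?')}")
def pvJobName (a : List (String × String)) : String :=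
  pvOr (List.lookup "job_title" a) ("job#" ++ (List.lookup "job_id" a).getD "?")

-- one applied entry's name, as in both Pythons
def pvFmtApplied (a : List (String × String)) : String :=
  pvJobName a ++ " @ " ++ pvOr (List.lookup "company" a) "?"

-- one failed entry's name, as in both Pythons
def pvFmtFailed (a : List (String × String)) : String :=
  pvJobName a ++
    (match List.lookup "reason" a with
     | some r => if r = "" then "" else " (reason: " ++ r ++ ")"
     | none => "")

-- ", ".join(...)
def pvJoinComma : List String → String
  | [] => ""
  | x :: xs => xs.foldl (fun acc s => acc ++ ", " ++ s) x

-- ===== PORT A =====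
-- " ".join(parts)
def pvJoinSpace : List String → String
  | [] => ""
  | x :: xs => xs.foldl (fun acc s => acc ++ " " ++ s) x

def deterministic_memory_answer_py (instruction : String) (applications : List (List (String × String))) (traces : List (List (String × String))) : String :=
  if applications = [] then
    "I don't have any application history stored yet. Try running an apply pipeline first!"
  else
    let applied := applications.filter (fun a => List.lookup "status" a == some "applied")
    let failed := applications.filter (fun a => List.lookup "status" a == some "failed")
    let skipped := applications.filter (fun a =>
      List.lookup "status" a == some "skipped" || List.lookup "status" a == some "duplicate")
    let parts := ["Application summary: " ++ PySem.Int.toStr (applied.length : Int) ++ " applied, " ++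
      PySem.Int.toStr (failed.length : Int) ++ " failed, " ++ PySem.Int.toStr (skipped.length : Int) ++ " skipped."]
    let parts := if applied ≠ [] then
        parts ++ ["Applied to: " ++ pvJoinComma ((applied.take 5).map pvFmtApplied) ++ "."]
      else parts
    let parts := if failed ≠ [] then
        parts ++ ["Failed: " ++ pvJoinComma ((failed.take 5).map pvFmtFailed) ++ "."]
      else parts
    pvJoinSpace parts

-- ===== PORT B =====
-- the loop body of Source B: classify one entry into the running state (na, nf, ns, ap5, fl5)
def pvStepB (acc : Nat × Nat × Nat × List String × List String) (a : List (String × String)) :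
    Nat × Nat × Nat × List String × List String :=
  let (na, nf, ns, ap5, fl5) := acc
  let st := List.lookup "status" a
  if st == some "applied" then
    (na + 1, nf, ns, if ap5.length < 5 then ap5 ++ [pvFmtApplied a] else ap5, fl5)
  else if st == some "failed" then
    (na, nf + 1, ns, ap5, if fl5.length < 5 then fl5 ++ [pvFmtFailed a] else fl5)
  else if st == some "skipped" || st == some "duplicate" then
    (na, nf, ns + 1, ap5, fl5)
  else
    acc

def deterministic_memory_answer_py_alt (instruction : String) (applications : List (List (String × String))) (traces : List (List (String × String))) : String :=
  if applications = [] then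
    "I don't have any application history stored yet. Try running an apply pipeline first!"
  else
    let st := applications.foldl pvStepB (0, 0, 0, [], [])
    let na := st.1
    let nf := st.2.1
    let ns := st.2.2.1
    let ap5 := st.2.2.2.1
    let fl5 := st.2.2.2.2
    let out := "Application summary: " ++ PySem.Int.toStr (na : Int) ++ " applied, " ++
      PySem.Int.toStr (nf : Int) ++ " failed, " ++ PySem.Int.toStr (ns : Int) ++ " skipped."
    let out := if na ≠ 0 then out ++ " Applied to: " ++ pvJoinComma ap5 ++ "." else out
    let out := if nf ≠ 0 then out ++ " Failed: " ++ pvJoinComma fl5 ++ "." else out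
    out

-- ===== PRECONDITION & SPEC =====
def Spec_deterministic_memory_answer_py (instruction : String) (applications : List (List (String × String))) (traces : List (List (String × String))) (out : String) : Prop := out = deterministic_memory_answer_py_alt instruction applications traces
instance (instruction : String) (applications : List (List (String × String))) (traces : List (List (String × String))) (out : String) : Decidable (Spec_deterministic_memory_answer_py instruction applications traces out) := by unfold Spec_deterministic_memory_answer_py; infer_instance

-- ===== CLAIM (what is proved, stated in full; the proofs are below) =====
def Claim_equal_deterministic_memory_answer_py : Prop := ∀ (instruction : String) (applications : List (List (String × String))) (traces : List (List (String × String))), Dom_deterministic_memory_answer_py instruction applications traces → Spec_deterministic_memory_answer_py instruction applications traces (deterministic_memory_answer_py instruction applications traces)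

-- ===== LEMMAS AND PROOFS =====

-- abbreviations (proof-side only) for A's three filter predicates
def pvPA (a : List (String × String)) : Bool := List.lookup "status" a == some "applied"
def pvPF (a : List (String × String)) : Bool := List.lookup "status" a == some "failed"
def pvPS (a : List (String × String)) : Bool :=
  List.lookup "status" a == some "skipped" || List.lookup "status" a == some "duplicate"

-- the single-pass state equals A's filter-based quantities
theorem pvFold_spec (l : List (List (String × String))) :
    l.foldl pvStepB (0, 0, 0, [], []) =
      ((l.filter pvPA).length, (l.filter pvPF).length, (l.filter pvPS).length,
       ((l.filter pvPA).take 5).map pvFmtApplied, ((l.filter pvPF).take 5).map pvFmtFailed) := by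
  induction l using List.reverseRecOn with
  | nil => rfl
  | append_singleton l x ih =>
    rw [List.foldl_append, ih]
    simp only [List.foldl_cons, List.foldl_nil, pvStepB, List.filter_append,
      List.filter_singleton]
    by_cases hA : List.lookup "status" x = some "applied"
    · simp only [pvPA, pvPF, pvPS, hA, List.take_append, List.length_take]
      by_cases h5 : (l.filter pvPA).length < 5
      · have h1 : 1 ≤ 5 - (l.filter pvPA).length := by omega
        simp [pvPA, h5, List.take_append, List.take_of_length_le, h1]
      · have h2 : 5 - (l.filter pvPA).length = 0 := by omega
        simp [pvPA, h5, h2, List.take_append]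
    · by_cases hF : List.lookup "status" x = some "failed"
      · simp only [pvPA, pvPF, pvPS, hA, hF, List.take_append, List.length_take]
        by_cases h5 : (l.filter pvPF).length < 5
        · have h1 : 1 ≤ 5 - (l.filter pvPF).length := by omega
          simp [pvPF, hA, h5, List.take_append, List.take_of_length_le, h1]
        · have h2 : 5 - (l.filter pvPF).length = 0 := by omega
          simp [pvPF, hA, h5, h2, List.take_append]
      · by_cases hS : (List.lookup "status" x = some "skipped" ∨ List.lookup "status" x = some "duplicate")
        · rcases hS with hS | hS <;> simp [pvPA, pvPF, pvPS, hA, hF, hS, beq_iff_eq]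
        · push_neg at hS
          simp [pvPA, pvPF, pvPS, cond_eq_if, hA, hF, hS.1, hS.2]

theorem pvJoinSpace_two (p q : String) : pvJoinSpace [p, q] = p ++ " " ++ q := rfl
theorem pvJoinSpace_three (p q r : String) : pvJoinSpace [p, q, r] = p ++ " " ++ q ++ " " ++ r := rfl

-- ===== VERDICT (by name: the statement is the Claim_ definition above) =====
theorem deterministic_memory_answer_py_spec : Claim_equal_deterministic_memory_answer_py := by
  intro instruction applications traces _
  unfold Spec_deterministic_memory_answer_py deterministic_memory_answer_py
    deterministic_memory_answer_py_alt
  by_cases hnil : applications = []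
  · simp [hnil]
  · simp only [if_neg hnil, pvFold_spec]
    set LA := applications.filter pvPA with hLA
    set LF := applications.filter pvPF with hLF
    have hA : (applications.filter (fun a => List.lookup "status" a == some "applied")) = LA := rfl
    have hF : (applications.filter (fun a => List.lookup "status" a == some "failed")) = LF := rfl
    have hS : (applications.filter (fun a =>
        List.lookup "status" a == some "skipped" || List.lookup "status" a == some "duplicate"))
        = applications.filter pvPS := rfl
    simp only [hA, hF, hS]
    by_cases hAe : LA = []
    · by_cases hFe : LF = []
      · simp [hAe, hFe, pvJoinSpace]
      · have : LF.length ≠ 0 := by simpa [List.length_eq_zero_iff] using hFe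
        simp [hAe, hFe, this, pvJoinSpace_two, String.append_assoc]
        simp [← String.append_assoc]
    · have hna : LA.length ≠ 0 := by simpa [List.length_eq_zero_iff] using hAe
      by_cases hFe : LF = []
      · simp [hAe, hFe, hna, pvJoinSpace_two, String.append_assoc]
        simp [← String.append_assoc]
      · have hnf : LF.length ≠ 0 := by simpa [List.length_eq_zero_iff] using hFe
        simp [hAe, hFe, hna, hnf, pvJoinSpace_three, String.append_assoc]
        simp [← String.append_assoc]
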